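-- pv_equiv track=rewrite | github.com/jsynacek/med-py | text.py | s_visual_len
-- ===== SOURCE A (Python) =====
-- def s_visual_len(line, tab_width=8):
--     l = 0
--     i = 0
--     for i in range(0, len(line)):
--         if line[i] == '\t':
--             l += tab_width - l % tab_width
--         else:
--             l += 1
--     return l
-- ===== SOURCE B (Python) =====
-- def s_visual_len(line, tab_width=8):
--     parts = line.split('\t')
--     l = len(parts[0])
--     for part in parts[1:]:
--         l += tab_width - l % tab_width
--         l += len(part)
--     return l
-- ===== Notes on version B (the rewrite author's own statement) =====
-- stated objective: simpler
-- what changed: Replaces the per-character loop with a per-character tab test by splitting the line on tabs once and doing one pass over the chunks, adding a tab jump plus the chunk length per chunk.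
import Mathlib
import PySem

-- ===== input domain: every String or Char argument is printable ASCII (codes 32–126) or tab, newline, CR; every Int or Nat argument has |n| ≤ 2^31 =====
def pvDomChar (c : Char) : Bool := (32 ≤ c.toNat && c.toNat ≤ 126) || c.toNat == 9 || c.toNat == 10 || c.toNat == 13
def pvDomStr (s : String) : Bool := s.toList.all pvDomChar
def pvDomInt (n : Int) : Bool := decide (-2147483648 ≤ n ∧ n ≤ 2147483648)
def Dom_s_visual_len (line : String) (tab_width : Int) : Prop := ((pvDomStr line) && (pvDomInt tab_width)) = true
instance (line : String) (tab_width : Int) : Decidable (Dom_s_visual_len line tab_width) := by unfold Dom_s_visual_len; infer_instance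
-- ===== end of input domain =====

-- B replaces A's per-character tab test with one split on '\t' followed by a pass over the
-- chunks (objective: simpler). Return-value equivalence; neither version mutates anything.

-- ===== PORT A =====
-- for i in range(0, len(line)): if line[i] == '\t': l += tab_width - l % tab_width else: l += 1
def s_visual_len (line : String) (tab_width : Int) : Int :=
  List.foldl
    (fun l i =>
      if PySem.List.pyGetD line.toList i ' ' = '\t' then
        l + (tab_width - PySem.Int.mod l tab_width)
      else l + 1)
    0 (PySem.List.pyRange 0 (PySem.List.len line.toList))

-- ===== PORT B =====
-- parts = line.split('\t'); l = len(parts[0]); for part in parts[1:]: l += tab_width - l % tab_width; l += len(part)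
def s_visual_len_alt (line : String) (tab_width : Int) : Int :=
  let parts := line.toList.splitOnP (· == '\t')
  List.foldl
    (fun l part => l + (tab_width - PySem.Int.mod l tab_width) + (part.length : Int))
    ((parts.headI.length : Int)) parts.tail

-- ===== PRECONDITION & SPEC =====
-- Pre_ excludes only the inputs where Python raises ZeroDivisionError: tab_width = 0 with a tab present
-- (both A and B raise there).
def Pre_s_visual_len (line : String) (tab_width : Int) : Prop :=
  '\t' ∈ line.toList → tab_width ≠ 0
instance (line : String) (tab_width : Int) : Decidable (Pre_s_visual_len line tab_width) := by
  unfold Pre_s_visual_len; infer_instance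

def pvWitness_s_visual_len : String × Int := ("a\tbc", 8)

def Spec_s_visual_len (line : String) (tab_width : Int) (out : Int) : Prop := out = s_visual_len_alt line tab_width
instance (line : String) (tab_width : Int) (out : Int) : Decidable (Spec_s_visual_len line tab_width out) := by unfold Spec_s_visual_len; infer_instance

-- ===== CLAIM (what is proved, stated in full; the proofs are below) =====
def Claim_equal_s_visual_len : Prop := ∀ (line : String) (tab_width : Int), Dom_s_visual_len line tab_width → Pre_s_visual_len line tab_width → Spec_s_visual_len line tab_width (s_visual_len line tab_width)

-- ===== LEMMAS AND PROOFS =====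

-- splitOnP never returns the empty list
lemma splitOnP_ne_nil (p : Char → Bool) (cs : List Char) : cs.splitOnP p ≠ [] := by
  induction cs with
  | nil => simp [List.splitOnP_nil]
  | cons c cs ih =>
    rw [List.splitOnP_cons]
    split
    · simp
    · cases h : cs.splitOnP p with
      | nil => exact absurd h ih
      | cons q qs => simp

-- the chunk pass computes the same value as the per-character loop, for every accumulator
lemma chunk_eq (tw : Int) (cs : List Char) : ∀ (l : Int),
    List.foldl (fun l c => if c = '\t' then l + (tw - PySem.Int.mod l tw) else l + 1) l cs
      = List.foldl (fun a part => a + (tw - PySem.Int.mod a tw) + (part.length : Int))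
          (l + (((cs.splitOnP (· == '\t')).headI.length : Int)))
          (cs.splitOnP (· == '\t')).tail := by
  induction cs with
  | nil => intro l; simp [List.splitOnP_nil]
  | cons c cs ih =>
    intro l
    rw [List.foldl_cons, List.splitOnP_cons]
    rcases h : cs.splitOnP (· == '\t') with _ | ⟨q, qs⟩
    · exact absurd h (splitOnP_ne_nil _ cs)
    · by_cases hc : c = '\t'
      · simp only [hc, beq_self_eq_true, if_pos]
        rw [ih (l + (tw - PySem.Int.mod l tw)), h]
        simp [List.foldl_cons]
      · have : (c == '\t') = false := by simp [hc]
        simp only [if_neg hc, this, Bool.false_eq_true, if_neg, not_false_iff]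
        rw [ih (l + 1), h]
        simp only [List.modifyHead, List.headI, List.tail, List.length_cons]
        congr 1
        push_cast
        ring

-- bridge: the pyRange/pyGetD loop of port A is the direct fold over the characters
lemma portA_eq_charFold (line : String) (tw : Int) :
    s_visual_len line tw
      = List.foldl (fun l c => if c = '\t' then l + (tw - PySem.Int.mod l tw) else l + 1) 0 line.toList := by
  unfold s_visual_len
  have := PySem.List.foldl_pyRange_pyGetD line.toList ' '
      (fun l c => if c = '\t' then l + (tw - PySem.Int.mod l tw) else l + 1) 0 (a := 0) (le_refl 0)
  simpa using this

theorem s_visual_len_spec : Claim_equal_s_visual_len := by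
  intro line tab_width _ _
  unfold Spec_s_visual_len s_visual_len_alt
  rw [portA_eq_charFold]
  simpa using chunk_eq tab_width line.toList 0
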